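-- pv_equiv track=rewrite | github.com/chemandante/Numeric | tests/test_sum_squares.py | countRepresentationsOfDeco4
-- ===== SOURCE A (Python) =====
-- PERMUTATIONS = [
--     [12, 6],  # 2-tuples: (a,b,0,0) = 12 perms, (a,a,0,0) = 6 perms
--     [24, 12, 12, 4],  # 3-tuples: (a,b,c,0) = 24, (a,a,b,0) = 12, (a,b,b,0) = 12, (a,a,a,0) = 4
--     [24, 12, 12, 4,  # 4-tuples: (a,b,c,d) = 24, (a,a,b,c) = 12, (a,b,b,c) = 12, (a,a,a,b) = 4
--      12, 6, 4, 1]]  # 4-tuples: (a,b,c,c) = 12, (a,a,b,b) = 6, (a,b,b,b) = 4, (a,a,a,a) = 1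
--
-- def countRepresentationsOfDeco4(d: tuple) -> int:
--     """
--     Returns number of representations of particular 4-square decomposition (see Jacobi's four-square theorem)
--     For example, decomposition of 2 = 1^2 + 1^2 can be represented in 24 ways, including permutations, zeros and
--     negatives:
--     (1^2 + 0^2 + 1^2 + 0^2), ((-1)^2 + 1^2 + 0^2 + 0^2), (0^2 + 0^2 + (-1)^2 + (-1)^2) and so on
--     Result = 2^(number of nonzero summands) * (number of permutations including zero summands)
--     :param d: Tuple of particular decomposition (can have less than 4 components). Must be sorted nonascending.
--     :return: Number of representations
--     """
--     nzc = len(d)  # Number of nonzero summands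
--     if nzc == 1:  # There is only 4 permutations for one element, so result = 2 * 4 = 8
--         return 8
--     # If there are more than 1 element, we should compare them for equality. For example:
--     # all summands are different - (a, b, c, d) has 4! = 24 permutations
--     # (a, a, b, c) has 4!/2! = 12, (a, a, a, b) has 4!/3! = 4 and (a, a, b, b) has 4!/(2!*2!) = 6 perms
--     # Tuple components have this relationship: d[0] >= d[1] >= d[2] >= d[3].
--     # Let compose a mask number `eq` less significant bit (LSB) of which relates to leftmost inequality
--     # (d[0] >= d[1]) and MSB to rightmost.
--     # bit == 1 when d[i] == d[i+1] and bit == 0 when d[i] > d[i+1] (not equal)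
--     # `eq` will contain 3 bits for 4-tuple, 2 bits for 3-tuple and only one bit for 2-tuple.
--     # This number (mask) corresponds to equalities and will be used to calculate count of permutations.
--     eq = 0
--     for i in range(0, nzc - 1):
--         eq *= 2
--         eq += 1 if d[i] == d[i + 1] else 0
--
--     return 2**nzc * PERMUTATIONS[nzc - 2][eq]  # From `l` to index in list
-- ===== SOURCE B (Python) =====
-- def countRepresentationsOfDeco4(d: tuple) -> int:
--     """Multinomial-coefficient formula: 2**nzc * 4!/(prod of run-length factorials * (4-nzc)!).
--     Replaces A's bitmask + permutation lookup table."""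
--     def fact(n):
--         r = 1
--         for k in range(2, n + 1):
--             r *= k
--         return r
--     nzc = len(d)
--     denom = fact(4 - nzc)
--     run = 0
--     prev = None
--     for x in d:
--         if run and prev == x:
--             run += 1
--         else:
--             denom *= fact(run)
--             run = 1
--         prev = x
--     denom *= fact(run)
--     return 2 ** nzc * (24 // denom)
-- ===== Notes on version B (the rewrite author's own statement) =====
-- stated objective: simpler
-- what changed: Replaces the bitmask-indexed PERMUTATIONS lookup table (and the length-1 special case) by a direct multinomial computation: 2**nzc * 24 // (product of factorials of the consecutive equal-run lengths times (4-nzc)!), in a single pass over d.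
-- intended difference: On the empty tuple A's negative-index table lookup accidentally returns 24, while B returns 1, the correct number of representations of the empty decomposition. — e.g. on countRepresentationsOfDeco4([]): A returns 24, B returns 1
import Mathlib
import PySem

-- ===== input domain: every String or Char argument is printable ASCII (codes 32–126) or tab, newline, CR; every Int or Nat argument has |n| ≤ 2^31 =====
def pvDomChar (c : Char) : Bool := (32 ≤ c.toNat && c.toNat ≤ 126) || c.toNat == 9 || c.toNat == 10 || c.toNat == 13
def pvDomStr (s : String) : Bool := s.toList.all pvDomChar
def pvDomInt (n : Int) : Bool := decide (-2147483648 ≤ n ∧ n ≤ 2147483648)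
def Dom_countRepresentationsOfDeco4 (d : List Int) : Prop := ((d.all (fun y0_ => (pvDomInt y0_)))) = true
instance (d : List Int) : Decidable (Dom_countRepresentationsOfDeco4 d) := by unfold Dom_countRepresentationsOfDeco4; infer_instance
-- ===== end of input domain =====

-- B replaces A's bitmask-indexed permutation lookup table by the multinomial formula
-- 2^nzc * (24 / (product of run-length factorials * (4-nzc)!)): simpler, no table.

-- ===== PORT A =====
def pvPermutations : List (List Int) :=
  [[12, 6], [24, 12, 12, 4], [24, 12, 12, 4, 12, 6, 4, 1]]

def countRepresentationsOfDeco4 (d : List Int) : Int :=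
  let nzc : Int := d.length
  if nzc = 1 then 8
  else
    let eq := (PySem.List.pyRange 0 (nzc - 1) 1).foldl
      (fun eq i =>
        eq * 2 + if PySem.List.pyGet? d i = PySem.List.pyGet? d (i + 1) then 1 else 0) 0
    -- PERMUTATIONS[nzc-2][eq]: none = IndexError (lists longer than 4), excluded by Pre_
    match PySem.List.pyGet? pvPermutations (nzc - 2) with
    | none => 0
    | some row =>
      match PySem.List.pyGet? row eq with
      | none => 0
      | some v => 2 ^ nzc.toNat * v

-- ===== PORT B =====
def pvFact (n : Int) : Int := (PySem.List.pyRange 2 (n + 1) 1).foldl (fun r k => r * k) 1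

def countRepresentationsOfDeco4_alt (d : List Int) : Int :=
  let nzc : Int := d.length
  let st := d.foldl
    (fun (st : Int × Int × Option Int) x =>
      let (denom, run, prev) := st
      if run ≠ 0 ∧ prev = some x then (denom, run + 1, some x)
      else (denom * pvFact run, 1, some x))
    (pvFact (4 - nzc), 0, none)
  let denom := st.1 * pvFact st.2.1
  2 ^ nzc.toNat * PySem.Int.floordiv 24 denom

-- ===== PRECONDITION & SPEC =====
-- Pre_ excludes lists longer than 4, on which A raises IndexError (the documented domain is ≤ 4 components).
def Pre_countRepresentationsOfDeco4 (d : List Int) : Prop := d.length ≤ 4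
instance (d : List Int) : Decidable (Pre_countRepresentationsOfDeco4 d) := by unfold Pre_countRepresentationsOfDeco4; infer_instance
def pvWitness_countRepresentationsOfDeco4 : List Int := [2, 1]

-- On the empty list A's negative-index table lookup accidentally returns 24;
-- B returns 1, the correct number of representations of the empty decomposition.
def D_countRepresentationsOfDeco4 (d : List Int) : Prop := d = []
instance (d : List Int) : Decidable (D_countRepresentationsOfDeco4 d) := by unfold D_countRepresentationsOfDeco4; infer_instance

def Spec_countRepresentationsOfDeco4 (d : List Int) (out : Int) : Prop := ¬ D_countRepresentationsOfDeco4 d → out = countRepresentationsOfDeco4_alt d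
instance (d : List Int) (out : Int) : Decidable (Spec_countRepresentationsOfDeco4 d out) := by unfold Spec_countRepresentationsOfDeco4; infer_instance

def pvDiffWitness_countRepresentationsOfDeco4 : List Int := []
def pvDiffWitnessOut_countRepresentationsOfDeco4 : Int × Int := (24, 1)

-- ===== CLAIM (what is proved, stated in full; the proofs are below) =====
def Claim_unchanged_countRepresentationsOfDeco4 : Prop := ∀ (d : List Int), Dom_countRepresentationsOfDeco4 d → Pre_countRepresentationsOfDeco4 d → Spec_countRepresentationsOfDeco4 d (countRepresentationsOfDeco4 d)
def Claim_changed_countRepresentationsOfDeco4 : Prop := Dom_countRepresentationsOfDeco4 (pvDiffWitness_countRepresentationsOfDeco4) ∧ Pre_countRepresentationsOfDeco4 (pvDiffWitness_countRepresentationsOfDeco4) ∧ D_countRepresentationsOfDeco4 (pvDiffWitness_countRepresentationsOfDeco4) ∧ countRepresentationsOfDeco4 (pvDiffWitness_countRepresentationsOfDeco4) = pvDiffWitnessOut_countRepresentationsOfDeco4.1 ∧ countRepresentationsOfDeco4_alt (pvDiffWitness_countRepresentationsOfDeco4) = pvDiffWitnessOut_countRepresentationsOfDeco4.2 ∧ pvDiffWitnessOut_countRepresentationsOfDeco4.1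 ≠ pvDiffWitnessOut_countRepresentationsOfDeco4.2
def Claim_exact_countRepresentationsOfDeco4 : Prop := ∀ (d : List Int), Dom_countRepresentationsOfDeco4 d → Pre_countRepresentationsOfDeco4 d → D_countRepresentationsOfDeco4 d → countRepresentationsOfDeco4 d ≠ countRepresentationsOfDeco4_alt d

-- ===== LEMMAS AND PROOFS =====

-- ===== VERDICT (by name: the statement is the Claim_ definition above) =====
set_option maxHeartbeats 2000000 in
theorem countRepresentationsOfDeco4_spec : Claim_unchanged_countRepresentationsOfDeco4 := by
  intro d _ hpre hnD
  match d, hpre, hnD with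
  | [], _, hnD => exact absurd rfl hnD
  | [a], _, _ =>
    simp [countRepresentationsOfDeco4, countRepresentationsOfDeco4_alt, pvFact,
      PySem.List.pyRange, List.range_succ, PySem.Int.floordiv]
  | [a, b], _, _ =>
    by_cases h1 : a = b <;>
    simp_all [countRepresentationsOfDeco4, countRepresentationsOfDeco4_alt, pvFact, pvPermutations,
      PySem.List.pyRange, List.range_succ, PySem.Int.floordiv]
  | [a, b, c], _, _ =>
    by_cases h1 : a = b <;> by_cases h2 : b = c <;>
    simp_all [countRepresentationsOfDeco4, countRepresentationsOfDeco4_alt, pvFact, pvPermutations,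
      PySem.List.pyRange, List.range_succ, PySem.Int.floordiv]
  | [a, b, c, e], _, _ =>
    by_cases h1 : a = b <;> by_cases h2 : b = c <;> by_cases h3 : c = e <;>
    simp_all [countRepresentationsOfDeco4, countRepresentationsOfDeco4_alt, pvFact, pvPermutations,
      PySem.List.pyRange, List.range_succ, PySem.Int.floordiv]
  | _ :: _ :: _ :: _ :: _ :: _, hpre, _ =>
    exact absurd hpre (by simp [Pre_countRepresentationsOfDeco4])

theorem countRepresentationsOfDeco4_changed : Claim_changed_countRepresentationsOfDeco4 := by
  unfold Claim_changed_countRepresentationsOfDeco4; decide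

theorem countRepresentationsOfDeco4_tight : Claim_exact_countRepresentationsOfDeco4 := by
  intro d _ _ hD
  subst hD
  decide
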